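-- pv_equiv track=rewrite | github.com/dirtyfilthy/pyGPOAbuse | pygpobtuse/gpo.py | update_extensionNames
-- ===== SOURCE A (Python) =====
-- def update_extensionNames(extensionName):
--     val1 = "00000000-0000-0000-0000-000000000000"
--     val2 = "CAB54552-DEEA-4691-817E-ED4A4D1AFC72"
--     val3 = "AADCED64-746C-4633-A97C-D61349046527"
--
--     if extensionName is None:
--         extensionName = ""
--
--     try:
--         if not val2 in extensionName:
--             new_values = []
--             toUpdate = ''.join(extensionName)
--             test = toUpdate.split("[")
--             for i in test:
--                 new_values.append(i.replace("{", "").replace("}", " ").replace("]", ""))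
--
--             if val1 not in toUpdate:
--                 new_values.append(val1 + " " + val2)
--
--             elif val1 in toUpdate:
--                 for k, v in enumerate(new_values):
--                     if val1 in new_values[k]:
--                         toSort = []
--                         test2 = new_values[k].split()
--                         for f in range(1, len(test2)):
--                             toSort.append(test2[f])
--                         toSort.append(val2)
--                         toSort.sort()
--                         new_values[k] = test2[0]
--                         for val in toSort:
--                             new_values[k] += " " + val
--
--             if val3 not in toUpdate:
--                 new_values.append(val3 + " " + val2)
--
--             elif val3 in toUpdate:
--                 for k, v in enumerate(new_values):
--                     if val3 in new_values[k]:
--                         toSort = []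
--                         test2 = new_values[k].split()
--                         for f in range(1, len(test2)):
--                             toSort.append(test2[f])
--                         toSort.append(val2)
--                         toSort.sort()
--                         new_values[k] = test2[0]
--                         for val in toSort:
--                             new_values[k] += " " + val
--
--             new_values.sort()
--
--             new_values2 = []
--             for i in range(len(new_values)):
--                 if new_values[i] is None or new_values[i] == "":
--                     continue
--                 value1 = new_values[i].split()
--                 new_val = ""
--                 for q in range(len(value1)):
--                     if value1[q] is None or value1[q] == "":
--                         continue
--                     new_val += "{" + value1[q] + "}"
--                 new_val = "[" + new_val + "]"
--                 new_values2.append(new_val)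
--
--             return "".join(new_values2)
--     except:
--         return "[{" + val1 + "}{" + val2 + "}]" + "[{" + val3 + "}{" + val2 + "}]"
-- ===== SOURCE B (Python) =====
-- VAL1 = "00000000-0000-0000-0000-000000000000"
-- VAL2 = "CAB54552-DEEA-4691-817E-ED4A4D1AFC72"
-- VAL3 = "AADCED64-746C-4633-A97C-D61349046527"
--
--
-- def _insert(acc, g):
--     # place g before the first strictly greater entry of the ordered list acc
--     i = 0
--     while i < len(acc) and not g < acc[i]:
--         i += 1
--     return acc[:i] + [g] + acc[i:]
--
--
-- def _finalize(group, has1, has3):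
--     # merge VAL2 into the sorted tail of a group holding a GUID present in the text
--     for guid, present in ((VAL1, has1), (VAL3, has3)):
--         if present and guid in group:
--             toks = group.split()
--             group = toks[0] + " " + " ".join(sorted(toks[1:] + [VAL2]))
--     return group
--
--
-- def update_extensionNames(extensionName):
--     text = "" if extensionName is None else extensionName
--     if VAL2 in text:
--         return None
--     has1, has3 = VAL1 in text, VAL3 in text
--     # one character-level pass: '[' closes a group, '{'/']' vanish, '}' becomes a space;
--     # each completed group is finalized and placed straight into an ordered accumulator
--     acc, cur = [], ""
--     for ch in text:
--         if ch == '[':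
--             acc = _insert(acc, _finalize(cur, has1, has3))
--             cur = ""
--         elif ch == '{' or ch == ']':
--             pass
--         elif ch == '}':
--             cur += " "
--         else:
--             cur += ch
--     acc = _insert(acc, _finalize(cur, has1, has3))
--     if not has1:
--         acc = _insert(acc, VAL1 + " " + VAL2)
--     if not has3:
--         acc = _insert(acc, VAL3 + " " + VAL2)
--     return "".join("[" + "".join("{" + t + "}" for t in g.split()) + "]"
--                    for g in acc if g != "")
-- ===== Notes on version B (the rewrite author's own statement) =====
-- stated objective: alternative
-- what changed: Replaces A's staged passes (split('[') plus three .replace chains, two duplicated enumerate-and-reassign merge loops, list.sort, index-range render loops) by a single character-level scan that closes a group at each '[', finalizes each group immediately and places it into an ordered accumulator by insertion, rendering once at the end; trades A's O(n log n) sort for an insertion sort over the groups.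
-- outside the precondition, e.g. on update_extensionNames('CAB54552-DEEA-4691-817E-ED4A4D1AFC72'): A returns None, B returns None
import Mathlib
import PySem

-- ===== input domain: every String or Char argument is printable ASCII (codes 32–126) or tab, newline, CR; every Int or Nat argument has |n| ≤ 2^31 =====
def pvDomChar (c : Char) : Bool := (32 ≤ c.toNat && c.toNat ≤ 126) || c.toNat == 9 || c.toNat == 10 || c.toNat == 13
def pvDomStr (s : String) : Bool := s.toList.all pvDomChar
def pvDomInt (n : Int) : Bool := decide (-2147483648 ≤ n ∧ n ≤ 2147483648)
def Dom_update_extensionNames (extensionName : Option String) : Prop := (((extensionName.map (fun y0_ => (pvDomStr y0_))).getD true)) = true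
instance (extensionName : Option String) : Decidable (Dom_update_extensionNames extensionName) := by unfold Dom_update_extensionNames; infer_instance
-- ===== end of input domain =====

-- B replaces A's staged passes (split('[') + three .replace chains, two enumerate-and-reassign
-- merge loops, list.sort, index-range render loops) by ONE character-level scan that closes a
-- group at each '[', finalizes it immediately and places it into an ordered accumulator by
-- insertion (objective: alternative; return value only — no side effects involved).

-- ===== PORT A =====
def pvVal1 : List Char := "00000000-0000-0000-0000-000000000000".toList
def pvVal2 : List Char := "CAB54552-DEEA-4691-817E-ED4A4D1AFC72".toList
def pvVal3 : List Char := "AADCED64-746C-4633-A97C-D61349046527".toList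

-- the body of A's 'for k, v in enumerate(new_values): if valX in new_values[k]: …' update step
def pvA_resort (entry : List Char) : List Char :=
  let test2 := PySem.Chars.split₀ entry
  let toSort := (PySem.List.pyRange 1 (test2.length : Int) 1).foldl
      (fun acc f => acc ++ [PySem.List.pyGetD test2 f []]) []
  let toSort := toSort ++ [pvVal2]
  let toSort := PySem.List.sorted toSort (fun x => x) false
  toSort.foldl (fun acc val => acc ++ (' ' :: val)) (PySem.List.pyGetD test2 0 [])

def pvA_core (extensionName : List Char) : List Char :=
  let toUpdate := PySem.Chars.join [] (extensionName.map (fun c => [c]))  -- ''.join(extensionName)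
  let test := (PySem.Chars.split? toUpdate ['[']).getD []                 -- sep "[" is nonempty: never none
  let new_values := test.foldl (fun acc i =>
      acc ++ [PySem.Chars.replace (PySem.Chars.replace (PySem.Chars.replace i ['{'] []) ['}'] [' ']) [']'] []]) []
  let new_values :=
    if PySem.Chars.isIn pvVal1 toUpdate = false then new_values ++ [pvVal1 ++ ' ' :: pvVal2]
    else if PySem.Chars.isIn pvVal1 toUpdate = true then
      new_values.map (fun entry => if PySem.Chars.isIn pvVal1 entry then pvA_resort entry else entry)
    else new_values
  let new_values :=
    if PySem.Chars.isIn pvVal3 toUpdate = false then new_values ++ [pvVal3 ++ ' ' :: pvVal2]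
    else if PySem.Chars.isIn pvVal3 toUpdate = true then
      new_values.map (fun entry => if PySem.Chars.isIn pvVal3 entry then pvA_resort entry else entry)
    else new_values
  let new_values := PySem.List.sorted new_values (fun x => x) false
  let new_values2 := (PySem.List.pyRange 0 (new_values.length : Int) 1).foldl (fun acc i =>
      let e := PySem.List.pyGetD new_values i []
      if e = [] then acc
      else
        let value1 := PySem.Chars.split₀ e
        let new_val := (PySem.List.pyRange 0 (value1.length : Int) 1).foldl (fun nv q =>
            let t := PySem.List.pyGetD value1 q []
            if t = [] then nv else nv ++ ('{' :: t ++ ['}'])) []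
        acc ++ ['[' :: new_val ++ [']']]) []
  PySem.Chars.join [] new_values2

def update_extensionNames (extensionName : Option String) : String :=
  let s := (extensionName.getD "").toList
  -- Python A falls through and returns None when val2 is already present: outside Pre_
  if PySem.Chars.isIn pvVal2 s then "" else String.ofList (pvA_core s)

-- ===== PORT B =====
-- toks[0] + " " + " ".join(sorted(toks[1:] + [VAL2]))
def pvB_merged (g : List Char) : List Char :=
  let toks := PySem.Chars.split₀ g
  PySem.List.pyGetD toks 0 [] ++ ' ' ::
    PySem.Chars.join [' ']
      (PySem.List.sorted (PySem.List.slice toks (some 1) none ++ [pvVal2]) (fun x => x) false)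

-- _finalize(group, has1, has3)
def pvB_finalize (h1 h3 : Bool) (g : List Char) : List Char :=
  let g := if h1 && PySem.Chars.isIn pvVal1 g then pvB_merged g else g
  if h3 && PySem.Chars.isIn pvVal3 g then pvB_merged g else g

-- the scanning loop of _insert: first index whose entry is strictly greater
def pvB_pos (g : List Char) : List (List Char) → Nat
  | [] => 0
  | h :: t => if g < h then 0 else pvB_pos g t + 1

-- _insert(acc, g) = acc[:i] + [g] + acc[i:]
def pvB_ins (acc : List (List Char)) (g : List Char) : List (List Char) :=
  let i := pvB_pos g acc
  acc.take i ++ [g] ++ acc.drop i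

-- the character loop: '[' closes a group, '{'/']' vanish, '}' becomes ' '
def pvB_scan (h1 h3 : Bool) : List Char → List (List Char) → List Char → List (List Char)
  | [], acc, cur => pvB_ins acc (pvB_finalize h1 h3 cur)
  | c :: rest, acc, cur =>
      if c = '[' then pvB_scan h1 h3 rest (pvB_ins acc (pvB_finalize h1 h3 cur)) []
      else if c = '{' ∨ c = ']' then pvB_scan h1 h3 rest acc cur
      else if c = '}' then pvB_scan h1 h3 rest acc (cur ++ [' '])
      else pvB_scan h1 h3 rest acc (cur ++ [c])

def pvB_render (g : List Char) : List Char :=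
  '[' :: PySem.Chars.join [] ((PySem.Chars.split₀ g).map (fun t => '{' :: t ++ ['}'])) ++ [']']

def pvB_core (text : List Char) : List Char :=
  let has1 := PySem.Chars.isIn pvVal1 text
  let has3 := PySem.Chars.isIn pvVal3 text
  let acc := pvB_scan has1 has3 text [] []
  let acc := if has1 then acc else pvB_ins acc (pvVal1 ++ ' ' :: pvVal2)
  let acc := if has3 then acc else pvB_ins acc (pvVal3 ++ ' ' :: pvVal2)
  PySem.Chars.join [] ((acc.filter (fun g => !g.isEmpty)).map pvB_render)

def update_extensionNames_alt (extensionName : Option String) : String :=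
  let text := (extensionName.getD "").toList
  -- Python B returns None when val2 is already present: outside Pre_
  if PySem.Chars.isIn pvVal2 text then "" else String.ofList (pvB_core text)

-- ===== PRECONDITION & SPEC =====
-- Pre_ excludes exactly the inputs already containing val2, on which Python A returns None
-- (no str): both programs return None there, which is not a value of the declared type.
def Pre_update_extensionNames (extensionName : Option String) : Prop :=
  PySem.Str.isIn "CAB54552-DEEA-4691-817E-ED4A4D1AFC72" (extensionName.getD "") = false
instance (extensionName : Option String) : Decidable (Pre_update_extensionNames extensionName) := by
  unfold Pre_update_extensionNames; infer_instance

def pvWitness_update_extensionNames : Option String :=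
  some "[{00000000-0000-0000-0000-000000000000}{35378EAC-683F-11D2-A89A-00C04FBBCFA2}]"

def Spec_update_extensionNames (extensionName : Option String) (out : String) : Prop := out = update_extensionNames_alt extensionName
instance (extensionName : Option String) (out : String) : Decidable (Spec_update_extensionNames extensionName out) := by unfold Spec_update_extensionNames; infer_instance

-- ===== CLAIM (what is proved, stated in full; the proofs are below) =====
def Claim_equal_update_extensionNames : Prop := ∀ (extensionName : Option String), Dom_update_extensionNames extensionName → Pre_update_extensionNames extensionName → Spec_update_extensionNames extensionName (update_extensionNames extensionName)

-- ===== LEMMAS AND PROOFS =====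

-- single-character view of str.replace with a one-character pattern
theorem pv_replace_go_single (c : Char) (t : List Char) :
    ∀ (l : List Char) (acc : List Char) (fuel : Nat), l.length ≤ fuel →
      PySem.Chars.replace.go [c] t fuel l acc
        = acc.reverse ++ l.flatMap (fun x => if x = c then t else [x]) := by
  intro l
  induction l with
  | nil =>
    intro acc fuel _
    cases fuel <;> simp [PySem.Chars.replace.go]
  | cons x r ih =>
    intro acc fuel hf
    cases fuel with
    | zero => simp at hf
    | succ f =>
      by_cases hx : x = c
      · subst hx
        have hpre : [x].isPrefixOf (x :: r) = true := by simp [List.isPrefixOf]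
        simp only [PySem.Chars.replace.go, hpre, if_true, List.length_singleton, List.drop_succ_cons,
          List.drop_zero]
        rw [ih _ f (by simpa using Nat.le_of_succ_le_succ hf)]
        simp
      · have hpre : [c].isPrefixOf (x :: r) = false := by
          simp [List.isPrefixOf, Ne.symm hx]
        simp only [PySem.Chars.replace.go, hpre]
        rw [ih _ f (by simpa using Nat.le_of_succ_le_succ hf)]
        simp [hx]

theorem pv_replace_single (s : List Char) (c : Char) (t : List Char) :
    PySem.Chars.replace s [c] t = s.flatMap (fun x => if x = c then t else [x]) := by
  have h : ([c].isEmpty) = false := by simp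
  simp only [PySem.Chars.replace, h, Bool.false_eq_true, if_false]
  rw [pv_replace_go_single c t s [] s.length (le_refl _)]
  simp

-- fused per-character effect of A's three replace calls
def pvClean1 (c : Char) : List Char :=
  if c = '{' ∨ c = ']' then [] else if c = '}' then [' '] else [c]

def pvCleanF (p : List Char) : List Char := p.flatMap pvClean1

theorem pv_cleanA_eq (p : List Char) :
    PySem.Chars.replace (PySem.Chars.replace (PySem.Chars.replace p ['{'] []) ['}'] [' ']) [']'] []
      = pvCleanF p := by
  rw [pv_replace_single, pv_replace_single, pv_replace_single, List.flatMap_assoc,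
    List.flatMap_assoc]
  unfold pvCleanF
  congr 1
  funext x
  by_cases h1 : x = '{' <;> by_cases h2 : x = '}' <;> by_cases h3 : x = ']' <;>
    simp_all [pvClean1]

-- recursive view of str.split("[")
def pvConsHead (c : Char) : List (List Char) → List (List Char)
  | [] => [[c]]
  | g :: t => (c :: g) :: t

def pvSplitC : List Char → List (List Char)
  | [] => [[]]
  | c :: r => if c = '[' then [] :: pvSplitC r else pvConsHead c (pvSplitC r)

theorem pv_splitC_ne_nil (cs : List Char) : pvSplitC cs ≠ [] := by
  cases cs with
  | nil => simp [pvSplitC]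
  | cons c r =>
    simp only [pvSplitC]
    split_ifs
    · simp
    · cases h : pvSplitC r <;> simp [pvConsHead]

def pvPrep (p : List Char) : List (List Char) → List (List Char)
  | [] => [p]
  | g :: t => (p ++ g) :: t

theorem pv_prep_nil {l : List (List Char)} (h : l ≠ []) : pvPrep [] l = l := by
  cases l with
  | nil => exact absurd rfl h
  | cons g t => simp [pvPrep]

theorem pv_prep_prep (p q : List Char) (l : List (List Char)) :
    pvPrep p (pvPrep q l) = pvPrep (p ++ q) l := by
  cases l <;> simp [pvPrep]

theorem pv_splitOn_go_single :
    ∀ (l : List Char) (cur : List Char) (acc : List (List Char)) (fuel : Nat),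
      l.length + 1 ≤ fuel →
      PySem.Chars.splitOn.go ['['] fuel l cur acc
        = acc.reverse ++ pvPrep cur.reverse (pvSplitC l) := by
  intro l
  induction l with
  | nil =>
    intro cur acc fuel hf
    cases fuel with
    | zero => simp at hf
    | succ f => simp [PySem.Chars.splitOn.go, pvSplitC, pvPrep]
  | cons x r ih =>
    intro cur acc fuel hf
    cases fuel with
    | zero => simp at hf
    | succ f =>
      by_cases hx : x = '['
      · subst hx
        have hpre : ['['].isPrefixOf ('[' :: r) = true := by simp [List.isPrefixOf]
        simp only [PySem.Chars.splitOn.go, hpre, if_true, List.length_singleton,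
          List.drop_succ_cons, List.drop_zero]
        rw [ih [] _ f (by simpa using Nat.le_of_succ_le_succ hf)]
        simp only [pvSplitC, if_true, List.reverse_nil]
        rw [pv_prep_nil (pv_splitC_ne_nil r)]
        simp [pvPrep]
      · have hpre : ['['].isPrefixOf (x :: r) = false := by
          simp [List.isPrefixOf, Ne.symm hx]
        simp only [PySem.Chars.splitOn.go, hpre]
        rw [ih (x :: cur) acc f (by simpa using Nat.le_of_succ_le_succ hf)]
        simp only [pvSplitC, hx, if_false]
        congr 1
        cases h : pvSplitC r with
        | nil => exact absurd h (pv_splitC_ne_nil r)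
        | cons g t => simp [pvConsHead, pvPrep]

theorem pv_splitOn_single (s : List Char) :
    PySem.Chars.splitOn s ['['] = pvSplitC s := by
  unfold PySem.Chars.splitOn
  rw [pv_splitOn_go_single s [] [] (s.length + 1) (le_refl _)]
  simp [pv_prep_nil (pv_splitC_ne_nil s)]

-- no word produced by Python's str.split() is empty
theorem pv_split_go_ne_nil (s : List Char) : ∀ (cur : List Char) (acc : List (List Char)),
    (∀ w ∈ acc, w ≠ []) → ∀ w ∈ PySem.Chars.split₀.go s cur acc, w ≠ [] := by
  induction s with
  | nil =>
    intro cur acc h w hw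
    have hgo : PySem.Chars.split₀.go [] cur acc
        = if cur.isEmpty = true then acc.reverse else (cur.reverse :: acc).reverse := rfl
    rw [hgo] at hw
    split_ifs at hw with h1
    · exact h w (List.mem_reverse.mp hw)
    · rcases List.mem_cons.mp (List.mem_reverse.mp hw) with rfl | hw'
      · simp only [List.isEmpty_iff] at h1
        simpa [List.reverse_eq_nil_iff] using h1
      · exact h w hw'
  | cons c rest ih =>
    intro cur acc h
    have hgo : PySem.Chars.split₀.go (c :: rest) cur acc
        = if PySem.Chars.isspace c = true then
            (if cur.isEmpty = true then PySem.Chars.split₀.go rest [] acc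
             else PySem.Chars.split₀.go rest [] (cur.reverse :: acc))
          else PySem.Chars.split₀.go rest (c :: cur) acc := rfl
    rw [hgo]
    split_ifs with h1 h2
    · exact ih [] acc h
    · refine ih [] _ ?_
      intro w hw
      rcases List.mem_cons.mp hw with rfl | hw'
      · simp only [List.isEmpty_iff] at h2
        simpa [List.reverse_eq_nil_iff] using h2
      · exact h w hw'
    · exact ih (c :: cur) acc h

theorem pv_split_ne_nil (cs : List Char) : ∀ w ∈ PySem.Chars.split₀ cs, w ≠ [] :=
  pv_split_go_ne_nil cs [] [] (by simp)

-- ''.join with separator '' is flatten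
theorem pv_join_nil_eq_flatten (l : List (List Char)) : PySem.Chars.join [] l = l.flatten := by
  induction l with
  | nil => simp [PySem.Chars.join_nil]
  | cons a t ih =>
    cases t with
    | nil => simp [PySem.Chars.join_singleton]
    | cons b r =>
      rw [PySem.Chars.join_cons_cons]
      simp only [List.flatten_cons] at *
      simp [ih]

-- A's ' '-prefixed accumulator is the seed followed by ' ' + ' '.join(l)  (l nonempty)
theorem pv_foldl_space (l : List (List Char)) (init : List Char) (h : l ≠ []) :
    l.foldl (fun acc val => acc ++ (' ' :: val)) init
      = init ++ ' ' :: PySem.Chars.join [' '] l := by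
  induction l generalizing init with
  | nil => exact absurd rfl h
  | cons a t ih =>
    cases t with
    | nil => simp [PySem.Chars.join_singleton]
    | cons b r =>
      rw [PySem.Chars.join_cons_cons]
      have := ih (init := init ++ (' ' :: a)) (by simp)
      simp only [List.foldl_cons] at *
      rw [this]
      simp

-- A's resort step equals B's merge helper
theorem pv_resort_eq_merged (g : List Char) : pvA_resort g = pvB_merged g := by
  simp only [pvA_resort, pvB_merged]
  rw [PySem.List.foldl_append_singleton_eq_map, List.nil_append,
      PySem.List.map_pyGetD_pyRange' (PySem.Chars.split₀ g) [] (a := 1) (by norm_num),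
      PySem.List.slice_from_one,
      pv_foldl_space _ _ (by simp [PySem.List.sorted_eq_nil_iff])]
  norm_num [List.drop_one]

-- skipping empty entries while appending is filter-then-map
theorem pv_foldl_skip_empty {F : List Char → List Char} {l : List (List Char)} :
    l.foldl (fun acc e => if e = [] then acc else acc ++ [F e]) []
      = (l.filter (fun g => !g.isEmpty)).map F := by
  have hfun : (fun (acc : List (List Char)) e => if e = [] then acc else acc ++ [F e])
      = (fun acc e => if (!e.isEmpty) = true then acc ++ [F e] else acc) := by
    funext acc e; cases e <;> simp
  rw [hfun, PySem.List.foldl_append_if, List.nil_append]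

-- A's inner brace-wrapping index loop equals B's join over a comprehension
theorem pv_renderA_eq (e : List Char) :
    (PySem.List.pyRange 0 ((PySem.Chars.split₀ e).length : Int) 1).foldl (fun nv q =>
        if PySem.List.pyGetD (PySem.Chars.split₀ e) q [] = [] then nv
        else nv ++ ('{' :: PySem.List.pyGetD (PySem.Chars.split₀ e) q [] ++ ['}'])) []
      = PySem.Chars.join [] ((PySem.Chars.split₀ e).map (fun t => '{' :: t ++ ['}'])) := by
  rw [PySem.List.foldl_pyRange_zero_pyGetD' (PySem.Chars.split₀ e) []
      (fun nv t => if t = [] then nv else nv ++ ('{' :: t ++ ['}'])) []]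
  have hcongr : (PySem.Chars.split₀ e).foldl
        (fun nv t => if t = [] then nv else nv ++ ('{' :: t ++ ['}'])) []
      = (PySem.Chars.split₀ e).foldl (fun nv t => nv ++ ('{' :: t ++ ['}'])) [] := by
    apply PySem.List.foldl_congr_mem
    intro acc x hx
    simp [pv_split_ne_nil e x hx]
  rw [hcongr, PySem.List.foldl_append_eq_flatMap, List.nil_append, pv_join_nil_eq_flatten,
      List.flatMap_def]

-- A's index-based render loop over the sorted entries equals B's filter + map render
theorem pv_render_eq (L : List (List Char)) :
    (PySem.List.pyRange 0 (L.length : Int) 1).foldl (fun acc i =>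
        if PySem.List.pyGetD L i [] = [] then acc
        else acc ++ ['[' ::
          (PySem.List.pyRange 0 ((PySem.Chars.split₀ (PySem.List.pyGetD L i [])).length : Int) 1).foldl
            (fun nv q =>
              if PySem.List.pyGetD (PySem.Chars.split₀ (PySem.List.pyGetD L i [])) q [] = [] then nv
              else nv ++ ('{' :: PySem.List.pyGetD (PySem.Chars.split₀ (PySem.List.pyGetD L i [])) q [] ++ ['}'])) []
          ++ [']']]) []
      = (L.filter (fun g => !g.isEmpty)).map pvB_render := by
  rw [PySem.List.foldl_pyRange_zero_pyGetD' L []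
      (fun acc e =>
        if e = [] then acc
        else acc ++ ['[' ::
          (PySem.List.pyRange 0 ((PySem.Chars.split₀ e).length : Int) 1).foldl
            (fun nv q =>
              if PySem.List.pyGetD (PySem.Chars.split₀ e) q [] = [] then nv
              else nv ++ ('{' :: PySem.List.pyGetD (PySem.Chars.split₀ e) q [] ++ ['}'])) []
          ++ [']']]) []]
  rw [pv_foldl_skip_empty]
  simp only [pv_renderA_eq]
  rfl

-- B's slice-based insert is PySem's ordered insert
theorem pv_ins_eq_insertBy (g : List Char) (acc : List (List Char)) :
    pvB_ins acc g = PySem.List.insertBy (fun a b => decide (a < b)) g acc := by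
  induction acc with
  | nil => simp [pvB_ins, pvB_pos, PySem.List.insertBy]
  | cons h t ih =>
    by_cases hlt : g < h
    · simp [pvB_ins, pvB_pos, hlt, PySem.List.insertBy]
    · simp only [pvB_ins, pvB_pos, hlt, decide_false, if_false, PySem.List.insertBy] at *
      simp only [List.take_succ_cons, List.drop_succ_cons, List.cons_append, decide_false,
        Bool.false_eq_true, if_false]
      rw [← ih]

-- folding B's insert is Python's sorted()
theorem pv_foldl_ins_eq_sorted (l : List (List Char)) :
    l.foldl pvB_ins [] = PySem.List.sorted l (fun x => x) false := by
  rw [PySem.List.sorted_eq_foldl_insertBy]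
  have : (pvB_ins : List (List Char) → List Char → List (List Char))
      = fun acc x => PySem.List.insertBy (fun a b => decide (a < b)) x acc := by
    funext acc x; exact pv_ins_eq_insertBy x acc
  rw [this]

-- the scan loop processes exactly the cleaned groups of the split, in order
theorem pv_scan_eq (h1 h3 : Bool) :
    ∀ (cs : List Char) (acc : List (List Char)) (cur : List Char),
      pvB_scan h1 h3 cs acc cur
        = (pvPrep cur ((pvSplitC cs).map pvCleanF)).foldl
            (fun a g => pvB_ins a (pvB_finalize h1 h3 g)) acc := by
  intro cs
  induction cs with
  | nil =>
    intro acc cur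
    simp [pvB_scan, pvSplitC, pvCleanF, pvPrep]
  | cons c rest ih =>
    intro acc cur
    have hmapne : (pvSplitC rest).map pvCleanF ≠ [] := by
      simp [pv_splitC_ne_nil rest]
    by_cases hb : c = '['
    · subst hb
      simp only [pvB_scan, if_true]
      rw [ih]
      simp only [pvSplitC, if_true, List.map_cons]
      rw [pv_prep_nil hmapne]
      cases hm : (pvSplitC rest).map pvCleanF with
      | nil => exact absurd hm hmapne
      | cons g t => simp [pvPrep, pvCleanF]
    · have hsplit : (pvSplitC (c :: rest)).map pvCleanF
          = pvPrep (pvClean1 c) ((pvSplitC rest).map pvCleanF) := by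
        simp only [pvSplitC, hb, if_false]
        cases hm : pvSplitC rest with
        | nil => exact absurd hm (pv_splitC_ne_nil rest)
        | cons g t => simp [pvConsHead, pvPrep, pvCleanF]
      rw [hsplit, pv_prep_prep]
      by_cases hc1 : c = '{' ∨ c = ']'
      · have : pvClean1 c = [] := by simp [pvClean1, hc1]
        rw [this, List.append_nil]
        simp only [pvB_scan, hb, hc1, if_false, if_true]
        exact ih acc cur
      · by_cases hc2 : c = '}'
        · have : pvClean1 c = [' '] := by simp [pvClean1, hc1, hc2]
          rw [this]
          simp only [pvB_scan, hb, hc1, hc2, if_false, if_true]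
          exact ih acc (cur ++ [' '])
        · have : pvClean1 c = [c] := by simp [pvClean1, hc1, hc2]
          rw [this]
          simp only [pvB_scan, hb, hc1, hc2, if_false]
          exact ih acc (cur ++ [c])

-- appended marker entries are untouched by the val3 merge pass
theorem pv_e1_no_val3 :
    PySem.Chars.isIn pvVal3 (pvVal1 ++ ' ' :: pvVal2) = false := by decide

-- processing each group through finalize before inserting is inserting the finalized groups
theorem pv_fold_fin (h1 h3 : Bool) (l : List (List Char)) :
    l.foldl (fun a g => pvB_ins a (pvB_finalize h1 h3 g)) []
      = (l.map (pvB_finalize h1 h3)).foldl pvB_ins [] := by rw [List.foldl_map]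

theorem pv_core_eq (cs : List Char) : pvA_core cs = pvB_core cs := by
  simp only [pvA_core, pvB_core]
  rw [PySem.Chars.join_nil_singletons]
  have hsplit : (PySem.Chars.split? cs ['[']).getD [] = pvSplitC cs := by
    simp [PySem.Chars.split?, pv_splitOn_single]
  rw [hsplit, PySem.List.foldl_append_singleton_eq_map, List.nil_append]
  simp only [pv_cleanA_eq]
  rw [pv_scan_eq, pv_prep_nil (by simp [pv_splitC_ne_nil cs]), pv_fold_fin]
  cases hv1 : PySem.Chars.isIn pvVal1 cs <;> cases hv3 : PySem.Chars.isIn pvVal3 cs <;>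
    simp only [hv1, hv3, Bool.false_eq_true, Bool.true_eq_false, if_false, if_true,
      pv_resort_eq_merged] <;>
    rw [pv_render_eq, ← pv_foldl_ins_eq_sorted]
  · -- neither marker in the text: finalize is the identity, both entries are appended
    have hfin : ((pvSplitC cs).map pvCleanF).map (pvB_finalize false false)
        = (pvSplitC cs).map pvCleanF := by
      simp [pvB_finalize]
    rw [hfin]
    simp [List.foldl_append]
  · -- only val3 in the text: finalize is the val3 merge; it leaves the appended val1 entry alone
    have hfin : ((pvSplitC cs).map pvCleanF).map
          (fun e => if PySem.Chars.isIn pvVal3 e = true then pvB_merged e else e)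
        = ((pvSplitC cs).map pvCleanF).map (pvB_finalize false true) := by
      simp [pvB_finalize]
    have he1 : (if PySem.Chars.isIn pvVal3 (pvVal1 ++ ' ' :: pvVal2) = true
        then pvB_merged (pvVal1 ++ ' ' :: pvVal2) else (pvVal1 ++ ' ' :: pvVal2))
        = pvVal1 ++ ' ' :: pvVal2 := by
      rw [pv_e1_no_val3]; simp
    rw [List.map_append, hfin]
    simp [List.foldl_append, he1]
  · -- only val1 in the text
    have hfin : ((pvSplitC cs).map pvCleanF).map
          (fun e => if PySem.Chars.isIn pvVal1 e = true then pvB_merged e else e)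
        = ((pvSplitC cs).map pvCleanF).map (pvB_finalize true false) := by
      simp [pvB_finalize]
    rw [hfin]
    simp [List.foldl_append]
  · -- both markers in the text: the two staged maps fuse into finalize
    have hfin : (((pvSplitC cs).map pvCleanF).map
          (fun e => if PySem.Chars.isIn pvVal1 e = true then pvB_merged e else e)).map
            (fun e => if PySem.Chars.isIn pvVal3 e = true then pvB_merged e else e)
        = ((pvSplitC cs).map pvCleanF).map (pvB_finalize true true) := by
      rw [List.map_map]
      simp [pvB_finalize, Function.comp]
    rw [hfin]

-- ===== VERDICT (by name: the statement is the Claim_ definition above) =====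
theorem update_extensionNames_spec : Claim_equal_update_extensionNames := by
  intro e _ hpre
  unfold Spec_update_extensionNames update_extensionNames update_extensionNames_alt
  have h2 : PySem.Chars.isIn pvVal2 (e.getD "").toList = false := by
    simpa [PySem.Str.isIn, pvVal2] using hpre
  simp only [h2, Bool.false_eq_true, if_false, pv_core_eq]
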